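-- pv_equiv track=rewrite | github.com/Arnavd83/avocado | scripts/prepare_viewer_root.py | _model_slug
-- ===== SOURCE A (Python) =====
-- def _model_slug(model_name: str) -> str | None:
--     if not model_name:
--         return None
--     base = model_name.split("/")[-1]
--     for suffix in ("-chat", "-instruct", "-preview"):
--         if base.endswith(suffix):
--             base = base[: -len(suffix)]
--             break
--     base = base.replace(".", "_")
--     cleaned = []
--     for char in base.lower():
--         cleaned.append(char if char.isalnum() else "_")
--     slug = "".join(cleaned).strip("_")
--     while "__" in slug:
--         slug = slug.replace("__", "_")
--     return slug or None
-- ===== SOURCE B (Python) =====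
-- def _model_slug(model_name: str) -> str | None:
--     if not model_name:
--         return None
--     base = model_name.split("/")[-1]
--     for suffix in ("-chat", "-instruct", "-preview"):
--         if base.endswith(suffix):
--             base = base[: -len(suffix)]
--             break
--     # single pass: keep alnum chars, emit one '_' per run of non-alnum chars
--     out = []
--     for char in base.lower():
--         if char.isalnum():
--             out.append(char)
--         elif not out or out[-1] != "_":
--             out.append("_")
--     slug = "".join(out).strip("_")
--     return slug or None
-- ===== Notes on version B (the rewrite author's own statement) =====
-- stated objective: alternative
-- what changed: A's three-stage tail (per-char clean into a list, join+strip('_'), then a while-loop that repeatedly rescans and rewrites the slug to collapse '__') is replaced by one left-to-right pass that suppresses underscore runs as it builds, followed by a single strip('_'); the '.' pre-replacement disappears since '.' is non-alnum anyway.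
import Mathlib
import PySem

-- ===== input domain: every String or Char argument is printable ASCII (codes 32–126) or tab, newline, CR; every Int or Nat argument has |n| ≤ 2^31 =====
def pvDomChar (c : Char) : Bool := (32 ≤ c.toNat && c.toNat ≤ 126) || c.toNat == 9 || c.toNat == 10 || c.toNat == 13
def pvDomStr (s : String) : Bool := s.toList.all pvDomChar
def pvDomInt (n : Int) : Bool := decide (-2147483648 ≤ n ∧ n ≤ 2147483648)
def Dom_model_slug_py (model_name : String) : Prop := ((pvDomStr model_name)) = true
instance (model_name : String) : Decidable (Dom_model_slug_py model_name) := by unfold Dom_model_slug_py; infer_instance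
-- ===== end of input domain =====

-- B replaces A's three-stage tail (clean every char, strip('_'), while-loop collapse of '__')
-- by one left-to-right pass that suppresses underscore runs as it builds, then a single strip('_').

-- ===== PORT A =====

-- structural model of s.replace("__", "_") (non-overlapping, left to right); needed to
-- justify termination of A's while-loop, and reused by the proofs below
def pvDedup2 : List Char → List Char
  | '_' :: '_' :: t => '_' :: pvDedup2 t
  | c :: t => c :: pvDedup2 t
  | [] => []

theorem pvDedup2_cons_ne (c d : Char) (t : List Char) (hp : ¬ (c = '_' ∧ d = '_')) :
    pvDedup2 (c :: d :: t) = c :: pvDedup2 (d :: t) := by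
  refine pvDedup2.eq_2 c (d :: t) ?_
  intro t' hc hd
  exact hp ⟨hc, (List.cons_eq_cons.mp hd).1⟩

theorem pvReplaceGo_us (fuel : Nat) : ∀ (l acc : List Char), l.length ≤ fuel →
    PySem.Chars.replace.go ['_', '_'] ['_'] fuel l acc = acc.reverse ++ pvDedup2 l := by
  induction fuel with
  | zero =>
    intro l acc h
    have : l = [] := List.eq_nil_of_length_eq_zero (Nat.le_zero.mp h)
    subst this; simp [PySem.Chars.replace.go, pvDedup2]
  | succ n ih =>
    intro l acc h
    match l with
    | [] => simp [PySem.Chars.replace.go, pvDedup2]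
    | [c] =>
      by_cases hc : c = '_'
      · subst hc
        simp only [PySem.Chars.replace.go, List.isPrefixOf, beq_self_eq_true,
          Bool.and_false, Bool.false_eq_true, if_false]
        rw [ih [] _ (by simp)]
        simp [pvDedup2]
      · simp only [PySem.Chars.replace.go, List.isPrefixOf, Bool.and_false,
          Bool.false_eq_true, if_false]
        rw [ih [] _ (by simp)]
        simp [pvDedup2, pvDedup2.eq_2 c [] (by intro t' _ h; cases h)]
    | c :: d :: t =>
      have ht : (d :: t).length ≤ n := by simpa using h
      have ht' : t.length ≤ n := by simp at h; omega
      by_cases hp : c = '_' ∧ d = '_'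
      · obtain ⟨hc, hd⟩ := hp; subst hc; subst hd
        simp only [PySem.Chars.replace.go, List.isPrefixOf, beq_self_eq_true,
          Bool.and_true, Bool.true_and, if_true]
        have hdrop : List.drop (['_','_'] : List Char).length ('_' :: '_' :: t) = t := rfl
        rw [hdrop, ih t _ ht']
        simp [pvDedup2]
      · have hpre : List.isPrefixOf ['_','_'] (c :: d :: t) = false := by
          simp only [List.isPrefixOf, Bool.and_true]
          simp only [Bool.and_eq_false_iff, beq_eq_false_iff_ne, ne_eq]
          by_cases hc : c = '_'
          · subst hc
            simp only [not_true_eq_false, false_or, eq_self_iff_true, true_iff, not_not]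
            intro hd; exact hp ⟨rfl, hd.symm⟩
          · left; intro h1; exact hc h1.symm
        simp only [PySem.Chars.replace.go, hpre, Bool.false_eq_true, if_false]
        rw [ih (d :: t) _ ht]
        simp [pvDedup2_cons_ne c d t hp]

theorem pvReplace_us (s : List Char) :
    PySem.Chars.replace s ['_', '_'] ['_'] = pvDedup2 s := by
  rw [PySem.Chars.replace]
  simp only [List.isEmpty_cons, Bool.false_eq_true, if_false]
  simpa using pvReplaceGo_us s.length s [] le_rfl

theorem pvDedup2_length_le (s : List Char) : (pvDedup2 s).length ≤ s.length := by
  fun_induction pvDedup2 s <;> simp_all <;> omega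

theorem pvDedup2_length_lt (s : List Char) (h : ['_', '_'] <:+: s) :
    (pvDedup2 s).length < s.length := by
  fun_induction pvDedup2 s with
  | case1 t _ =>
    have := pvDedup2_length_le t
    simp; omega
  | case2 c t hne ih =>
    have hct : ['_','_'] <:+: t := by
      rcases List.infix_cons_iff.mp h with hpre | hinf
      · exfalso
        obtain ⟨u, hu⟩ := hpre
        cases t with
        | nil => simp at hu
        | cons d t' =>
          obtain ⟨h1, h2⟩ := List.cons_eq_cons.mp hu
          obtain ⟨h3, h4⟩ := List.cons_eq_cons.mp h2
          exact hne t' h1.symm (by rw [h3])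
      · exact hinf
    have := ih hct
    simp; omega
  | case3 => simp at h

-- while "__" in slug: slug = slug.replace("__", "_")
def pvCollapseA (slug : List Char) : List Char :=
  if h : PySem.Chars.isIn ['_', '_'] slug then
    pvCollapseA (PySem.Chars.replace slug ['_', '_'] ['_'])
  else slug
termination_by slug.length
decreasing_by
  rw [pvReplace_us]
  exact pvDedup2_length_lt slug ((PySem.Chars.isIn_iff_infix _ _).mp h)

-- for suffix in ("-chat", "-instruct", "-preview"): first match strips and breaks
def pvStripSuffixA (base : List Char) : List (List Char) → List Char
  | [] => base
  | suf :: rest =>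
    if PySem.Chars.endswith base suf then
      PySem.Chars.slice base none (some (-(suf.length : Int)))
    else pvStripSuffixA base rest

def model_slug_py (model_name : String) : Option String :=
  let cs := model_name.toList
  if cs = [] then none
  else
    -- split("/") always yields at least one part, so the [-1] index never raises
    let base := (PySem.List.pyGet? (PySem.Chars.splitOn cs ['/']) (-1)).getD []
    let base := pvStripSuffixA base ["-chat".toList, "-instruct".toList, "-preview".toList]
    let base := PySem.Chars.replace base ['.'] ['_']
    let cleaned := (PySem.Chars.lower base).foldl
      (fun acc c => acc ++ [if PySem.Chars.isalnum c then c else '_']) []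
    let slug := PySem.Chars.stripChars cleaned ['_']
    let slug := pvCollapseA slug
    if slug = [] then none else some (String.ofList slug)

-- ===== PORT B =====

def pvStripSuffixB (base : List Char) : List (List Char) → List Char
  | [] => base
  | suf :: rest =>
    if PySem.Chars.endswith base suf then
      PySem.Chars.slice base none (some (-(suf.length : Int)))
    else pvStripSuffixB base rest

def model_slug_py_alt (model_name : String) : Option String :=
  let cs := model_name.toList
  if cs = [] then none
  else
    let base := (PySem.List.pyGet? (PySem.Chars.splitOn cs ['/']) (-1)).getD []
    let base := pvStripSuffixB base ["-chat".toList, "-instruct".toList, "-preview".toList]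
    -- single pass: keep alnum chars, emit one '_' per run of non-alnum chars
    let out := (PySem.Chars.lower base).foldl
      (fun acc c =>
        if PySem.Chars.isalnum c then acc ++ [c]
        else if acc = [] ∨ acc.getLast? ≠ some '_' then acc ++ ['_'] else acc) []
    let slug := PySem.Chars.stripChars out ['_']
    if slug = [] then none else some (String.ofList slug)

-- ===== PRECONDITION & SPEC =====
def Spec_model_slug_py (model_name : String) (out : Option String) : Prop := out = model_slug_py_alt model_name
instance (model_name : String) (out : Option String) : Decidable (Spec_model_slug_py model_name out) := by unfold Spec_model_slug_py; infer_instance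

-- ===== CLAIM (what is proved, stated in full; the proofs are below) =====
def Claim_equal_model_slug_py : Prop := ∀ (model_name : String), Dom_model_slug_py model_name → Spec_model_slug_py model_name (model_slug_py model_name)

-- ===== LEMMAS AND PROOFS =====

-- canonical run-collapser: every maximal run of '_' becomes a single '_'
def pvSqueeze : List Char → List Char
  | [] => []
  | [c] => [c]
  | c :: d :: t => if c = '_' ∧ d = '_' then pvSqueeze (d :: t) else c :: pvSqueeze (d :: t)

theorem pvSqueeze_cons_ne (c : Char) (t : List Char) (hc : c ≠ '_') :
    pvSqueeze (c :: t) = c :: pvSqueeze t := by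
  cases t with
  | nil => simp [pvSqueeze]
  | cons d t' => simp [pvSqueeze, hc]

theorem pvSqueeze_cons_us (x : List Char) :
    pvSqueeze ('_' :: x) = '_' :: (pvSqueeze x).dropWhile (· == '_') := by
  induction x with
  | nil => simp [pvSqueeze]
  | cons d t ih =>
    by_cases hd : d = '_'
    · subst hd
      have h1 : pvSqueeze ('_' :: '_' :: t) = pvSqueeze ('_' :: t) := by simp [pvSqueeze]
      rw [h1, ih]
      rw [List.dropWhile_cons_of_pos (by simp)]
      rw [List.dropWhile_idempotent]
    · have h1 : pvSqueeze ('_' :: d :: t) = '_' :: pvSqueeze (d :: t) := by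
        simp [pvSqueeze, hd]
      rw [h1, pvSqueeze_cons_ne d t hd]
      rw [List.dropWhile_cons_of_neg (by simp [hd])]

theorem pvSqueeze_dropWhile (s : List Char) :
    pvSqueeze (s.dropWhile (· == '_')) = (pvSqueeze s).dropWhile (· == '_') := by
  induction s with
  | nil => simp [pvSqueeze]
  | cons c t ih =>
    by_cases hc : c = '_'
    · subst hc
      rw [List.dropWhile_cons_of_pos (by simp), ih, pvSqueeze_cons_us,
          List.dropWhile_cons_of_pos (by simp), List.dropWhile_idempotent]
    · rw [List.dropWhile_cons_of_neg (by simp [hc]), pvSqueeze_cons_ne c t hc,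
          List.dropWhile_cons_of_neg (by simp [hc])]

theorem pvSqueeze_dedup2 (s : List Char) : pvSqueeze (pvDedup2 s) = pvSqueeze s := by
  fun_induction pvDedup2 s with
  | case1 t ih =>
    rw [pvSqueeze_cons_us, ih, show pvSqueeze ('_' :: '_' :: t) = pvSqueeze ('_' :: t) from by
      simp [pvSqueeze], pvSqueeze_cons_us]
  | case2 c t hne ih =>
    by_cases hc : c = '_'
    · subst hc; rw [pvSqueeze_cons_us, ih, pvSqueeze_cons_us]
    · rw [pvSqueeze_cons_ne c _ hc, ih, pvSqueeze_cons_ne c _ hc]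
  | case3 => rfl

theorem pvSqueeze_of_not_infix (s : List Char) (h : ¬ ['_', '_'] <:+: s) :
    pvSqueeze s = s := by
  fun_induction pvSqueeze s with
  | case1 => rfl
  | case2 c => rfl
  | case3 c d t hcd ih =>
    exact absurd (by rw [hcd.1, hcd.2]; exact ⟨[], t, by simp⟩) h
  | case4 c d t hcd ih =>
    have : ¬ ['_','_'] <:+: (d :: t) := by
      intro hi; exact h (hi.trans (List.suffix_cons c (d::t)).isInfix)
    rw [ih this]

theorem pvCollapseA_eq_squeeze (s : List Char) : pvCollapseA s = pvSqueeze s := by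
  fun_induction pvCollapseA s with
  | case1 s h ih =>
    rw [ih, pvReplace_us, pvSqueeze_dedup2]
  | case2 s h =>
    rw [pvSqueeze_of_not_infix s (by
      intro hi
      exact h ((PySem.Chars.isIn_iff_infix _ _).mpr hi))]

theorem pvSqueeze_append_us_us (xs : List Char) :
    pvSqueeze (xs ++ ['_', '_']) = pvSqueeze (xs ++ ['_']) := by
  induction xs with
  | nil => simp [pvSqueeze]
  | cons x t ih =>
    cases t with
    | nil =>
      by_cases hx : x = '_' <;> simp [pvSqueeze, hx]
    | cons y t' =>
      by_cases hxy : x = '_' ∧ y = '_' <;>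
        simp only [List.cons_append, pvSqueeze, hxy, if_true, if_false] <;>
        simp_all [List.cons_append]

theorem pvSqueeze_append_ne (xs : List Char) (c : Char)
    (h : ¬ (c = '_' ∧ xs.getLast? = some '_')) :
    pvSqueeze (xs ++ [c]) = pvSqueeze xs ++ [c] := by
  induction xs with
  | nil => simp [pvSqueeze]
  | cons x t ih =>
    cases t with
    | nil =>
      have : ¬ (x = '_' ∧ c = '_') := by
        intro ⟨h1, h2⟩; exact h ⟨h2, by simp [h1]⟩
      simp [pvSqueeze, this]
    | cons y t' =>
      have ht : ¬ (c = '_' ∧ (y :: t').getLast? = some '_') := by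
        intro ⟨h1, h2⟩; exact h ⟨h1, by simpa using h2⟩
      by_cases hxy : x = '_' ∧ y = '_' <;>
        simp only [List.cons_append, pvSqueeze, hxy, if_true, if_false] <;>
        simp_all [List.cons_append]

theorem pvSqueeze_reverse (s : List Char) :
    pvSqueeze s.reverse = (pvSqueeze s).reverse := by
  fun_induction pvSqueeze s with
  | case1 => rfl
  | case2 c => rfl
  | case3 c d t hcd ih =>
    rw [hcd.1, hcd.2] at *
    have hr : ('_' :: '_' :: t).reverse = t.reverse ++ ['_'] ++ ['_'] := by simp
    rw [hr, List.append_assoc]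
    rw [show (['_'] ++ ['_'] : List Char) = ['_','_'] from rfl]
    rw [pvSqueeze_append_us_us, ← List.reverse_cons, ih]
  | case4 c d t hcd ih =>
    have hrev : (c :: d :: t).reverse = (d :: t).reverse ++ [c] := by simp
    rw [hrev, pvSqueeze_append_ne _ _ (by
      intro ⟨h1, h2⟩
      simp [List.getLast?_reverse] at h2
      exact hcd ⟨h1, h2⟩), ih]
    simp

theorem pvStrip_squeeze (t : List Char) :
    PySem.Chars.stripChars (pvSqueeze t) ['_'] = pvSqueeze (PySem.Chars.stripChars t ['_']) := by
  have hp : (fun c => (['_'] : List Char).contains c) = (fun c : Char => c == '_') := by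
    funext c; simp [List.contains_cons]; rfl
  simp only [PySem.Chars.stripChars, hp]
  rw [← pvSqueeze_dropWhile, ← pvSqueeze_reverse, ← pvSqueeze_dropWhile, ← pvSqueeze_reverse]

-- B's one-pass loop computes the run-collapsed cleaning
theorem pvFoldB_eq_squeeze (cs : List Char) : ∀ (acc : List Char),
    cs.foldl
      (fun acc c =>
        if PySem.Chars.isalnum c then acc ++ [c]
        else if acc = [] ∨ acc.getLast? ≠ some '_' then acc ++ ['_'] else acc) acc =
    acc ++ (if acc.getLast? = some '_'
            then (pvSqueeze (cs.map (fun c => if PySem.Chars.isalnum c then c else '_'))).dropWhile (· == '_')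
            else pvSqueeze (cs.map (fun c => if PySem.Chars.isalnum c then c else '_'))) := by
  induction cs with
  | nil => intro acc; simp [pvSqueeze]
  | cons c cs ih =>
    intro acc
    by_cases ha : PySem.Chars.isalnum c = true
    · have hc : c ≠ '_' := by intro h; subst h; exact absurd ha (by decide)
      simp only [List.foldl_cons, ha, if_true, List.map_cons]
      rw [ih (acc ++ [c])]
      rw [List.getLast?_concat]
      rw [if_neg (show ¬ ((some c : Option Char) = some '_') by simpa using hc)]
      rw [pvSqueeze_cons_ne _ _ hc]
      by_cases hl : acc.getLast? = some '_'
      · rw [if_pos hl, List.dropWhile_cons_of_neg (by simp [hc])]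
        simp
      · rw [if_neg hl]
        simp
    · have ha' : (if PySem.Chars.isalnum c then c else '_') = '_' := by simp [ha]
      simp only [List.foldl_cons, ha, if_false, List.map_cons, ha']
      by_cases hl : acc.getLast? = some '_'
      · have hne : ¬ (acc = [] ∨ acc.getLast? ≠ some '_') := by
          push_neg
          constructor
          · intro h; subst h; simp at hl
          · exact hl
        simp only [Bool.false_eq_true, if_false]
        rw [if_neg hne, ih acc]
        simp only [hl, if_true]
        rw [pvSqueeze_cons_us, List.dropWhile_cons_of_pos (by simp), List.dropWhile_idempotent]
      · have hyes : acc = [] ∨ acc.getLast? ≠ some '_' := Or.inr hl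
        simp only [Bool.false_eq_true, if_false]
        rw [if_pos hyes, ih (acc ++ ['_']), List.getLast?_concat]
        simp only [if_true, hl, if_false]
        rw [pvSqueeze_cons_us]
        simp

theorem pvReplaceGo_dot (fuel : Nat) : ∀ (l acc : List Char), l.length ≤ fuel →
    PySem.Chars.replace.go ['.'] ['_'] fuel l acc =
      acc.reverse ++ l.map (fun c => if c = '.' then '_' else c) := by
  induction fuel with
  | zero =>
    intro l acc h
    have : l = [] := List.eq_nil_of_length_eq_zero (Nat.le_zero.mp h)
    subst this; simp [PySem.Chars.replace.go]
  | succ n ih =>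
    intro l acc h
    match l with
    | [] => simp [PySem.Chars.replace.go]
    | c :: t =>
      have ht : t.length ≤ n := by simpa using h
      by_cases hc : c = '.'
      · subst hc
        simp only [PySem.Chars.replace.go, List.isPrefixOf, beq_self_eq_true,
          Bool.and_true, Bool.true_and, if_true]
        have hdrop : List.drop (['.'] : List Char).length ('.' :: t) = t := rfl
        rw [hdrop, ih t _ ht]
        simp
      · have hpre : List.isPrefixOf ['.'] (c :: t) = false := by
          simp [List.isPrefixOf]
          intro h1; exact hc h1.symm
        simp only [PySem.Chars.replace.go, hpre, Bool.false_eq_true, if_false]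
        rw [ih t _ ht]
        simp [hc]

theorem pvReplace_dot (s : List Char) :
    PySem.Chars.replace s ['.'] ['_'] = s.map (fun c => if c = '.' then '_' else c) := by
  rw [PySem.Chars.replace]
  simp only [List.isEmpty_cons, Bool.false_eq_true, if_false]
  simpa using pvReplaceGo_dot s.length s [] le_rfl

theorem pvCleanA_eq (base : List Char) :
    (PySem.Chars.lower (PySem.Chars.replace base ['.'] ['_'])).map
        (fun c => if PySem.Chars.isalnum c then c else '_') =
    (PySem.Chars.lower base).map (fun c => if PySem.Chars.isalnum c then c else '_') := by
  rw [pvReplace_dot]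
  simp only [PySem.Chars.lower, List.map_map]
  refine List.map_congr_left ?_
  intro c _
  by_cases hc : c = '.'
  · subst hc; decide
  · simp [Function.comp, hc]

theorem pvStripSuffix_eq (base : List Char) (l : List (List Char)) :
    pvStripSuffixA base l = pvStripSuffixB base l := by
  induction l with
  | nil => rfl
  | cons suf rest ih => simp [pvStripSuffixA, pvStripSuffixB, ih]

-- ===== VERDICT (by name: the statement is the Claim_ definition above) =====
theorem model_slug_py_spec : Claim_equal_model_slug_py := by
  intro m _
  unfold Spec_model_slug_py
  simp only [model_slug_py, model_slug_py_alt]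
  by_cases hm : m.toList = []
  · simp [hm]
  · simp only [hm, if_false]
    rw [pvStripSuffix_eq]
    set base := pvStripSuffixB ((PySem.List.pyGet? (PySem.Chars.splitOn m.toList ['/']) (-1)).getD [])
      ["-chat".toList, "-instruct".toList, "-preview".toList] with hbase
    rw [PySem.List.foldl_append_singleton_eq_map]
    simp only [List.nil_append]
    rw [show (PySem.Chars.lower (PySem.Chars.replace base ['.'] ['_'])).map
          (fun c => if PySem.Chars.isalnum c then c else '_') =
        (PySem.Chars.lower base).map (fun c => if PySem.Chars.isalnum c then c else '_')
        from pvCleanA_eq base]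
    rw [pvFoldB_eq_squeeze]
    simp only [List.getLast?_nil, List.nil_append, if_neg (by simp : ¬ (none : Option Char) = some '_')]
    rw [pvCollapseA_eq_squeeze, ← pvStrip_squeeze]
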